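-- pv_equiv track=rewrite | github.com/akode/advent_of_code | day10.py | completion_score
-- ===== SOURCE A (Python) =====
-- def completion_score(completion):
--     value = {
--         ")": 1,
--         "]": 2,
--         "}": 3,
--         ">": 4
--     }
--     total = 0
--     for item in completion:
--         total = total*5 + value[item]
--     return total
-- ===== SOURCE B (Python) =====
-- def completion_score(completion):
--     value = {
--         ")": 1,
--         "]": 2,
--         "}": 3,
--         ">": 4
--     }
--     n = len(completion)
--     return sum(value[c] * 5**(n - 1 - i) for i, c in enumerate(completion))
-- ===== Notes on version B (the rewrite author's own statement) =====
-- stated objective: alternative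
-- what changed: Replaced the running Horner accumulator total=total*5+value[item] by an explicit positional sum of place-values value[c]*5**(n-1-i) over enumerate(completion).
import Mathlib
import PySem

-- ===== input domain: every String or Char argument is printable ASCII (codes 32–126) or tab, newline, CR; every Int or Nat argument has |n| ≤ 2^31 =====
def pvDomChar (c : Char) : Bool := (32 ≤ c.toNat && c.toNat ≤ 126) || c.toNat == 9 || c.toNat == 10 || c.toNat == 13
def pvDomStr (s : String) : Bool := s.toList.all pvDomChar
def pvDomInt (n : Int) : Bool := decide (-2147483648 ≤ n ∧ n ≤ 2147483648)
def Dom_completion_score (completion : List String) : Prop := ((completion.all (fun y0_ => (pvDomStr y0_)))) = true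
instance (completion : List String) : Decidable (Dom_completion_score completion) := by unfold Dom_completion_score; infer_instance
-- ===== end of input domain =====

-- B replaces A's Horner accumulation by an explicit positional sum of base-5 place-values (alternative decomposition, same cost).


-- ===== PORT A =====
-- the literal dict of A/B; Pre_ guarantees every looked-up item is a key, so getD's default is unreachable
def pvValueDict : PySem.Dict String Int :=
  ((((PySem.Dict.empty.insert ")" 1).insert "]" 2).insert "}" 3).insert ">" 4)

def completion_score (completion : List String) : Int :=
  completion.foldl (fun total item => total * 5 + pvValueDict.getD item 0) 0

-- ===== PORT B =====
def completion_score_alt (completion : List String) : Int :=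
  let n := completion.length
  (PySem.List.enumerate completion).foldl
    (fun acc p => acc + pvValueDict.getD p.2 0 * (5 : Int) ^ (((n : Int) - 1 - p.1).toNat)) 0

-- ===== PRECONDITION & SPEC =====
-- Pre_ excludes inputs on which A raises KeyError: every item must be one of the four closer strings.
def Pre_completion_score (completion : List String) : Prop :=
  ∀ s ∈ completion, s = ")" ∨ s = "]" ∨ s = "}" ∨ s = ">"
instance (completion : List String) : Decidable (Pre_completion_score completion) := by
  unfold Pre_completion_score; infer_instance

def pvWitness_completion_score : List String := [")", "]", "}", ">"]

def Spec_completion_score (completion : List String) (out : Int) : Prop := out = completion_score_alt completion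
instance (completion : List String) (out : Int) : Decidable (Spec_completion_score completion out) := by unfold Spec_completion_score; infer_instance

-- ===== CLAIM (what is proved, stated in full; the proofs are below) =====
def Claim_equal_completion_score : Prop := ∀ (completion : List String), Dom_completion_score completion → Pre_completion_score completion → Spec_completion_score completion (completion_score completion)

-- ===== LEMMAS AND PROOFS =====

-- reference value: the base-5 number with digits val of l
def pvRef (l : List String) : Int :=
  match l with
  | [] => 0
  | x :: xs => pvValueDict.getD x 0 * (5 : Int) ^ xs.length + pvRef xs

theorem pvHornerA (l : List String) : ∀ t : Int,
    l.foldl (fun total item => total * 5 + pvValueDict.getD item 0) t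
      = t * (5 : Int) ^ l.length + pvRef l := by
  induction l with
  | nil => intro t; simp [pvRef]
  | cons x xs ih =>
    intro t
    simp only [List.foldl_cons, ih, pvRef, List.length_cons]
    ring

theorem pvSumB (l : List String) : ∀ (s : Int) (n : Nat) (acc : Int),
    0 ≤ s → s.toNat + l.length = n →
    (PySem.List.enumerate l s).foldl
        (fun acc p => acc + pvValueDict.getD p.2 0 * (5 : Int) ^ (((n : Int) - 1 - p.1).toNat)) acc
      = acc + pvRef l := by
  induction l with
  | nil => intro s n acc _ _; simp [PySem.List.enumerate_nil, pvRef]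
  | cons x xs ih =>
    intro s n acc hs hn
    rw [PySem.List.enumerate_cons, List.foldl_cons]
    rw [ih (s + 1) n _ (by omega) (by simp at hn ⊢; omega)]
    have hexp : (((n : Int) - 1 - s).toNat) = xs.length := by
      simp only [List.length_cons] at hn; omega
    rw [hexp]
    simp [pvRef]; ring

-- ===== VERDICT (by name: the statement is the Claim_ definition above) =====
theorem completion_score_spec : Claim_equal_completion_score := by
  intro completion _ _
  unfold Spec_completion_score completion_score completion_score_alt
  rw [pvHornerA, pvSumB completion 0 completion.length 0 (by omega) (by simp)]
  simp
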